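-- pv_equiv track=rewrite | github.com/ayushfaujdar/LearningTrackerPro-2 | file_parser.py | _find_section_indices
-- ===== SOURCE A (Python) =====
-- from typing import Dict, List, Any, Tuple
--
-- def _find_section_indices(rows: List[List[str]]) -> Tuple[int, int]:
--     """
--     Find indices of 'Developers' and 'Projects' sections in CSV.
--
--     Args:
--         rows: List of CSV rows
--
--     Returns:
--         Tuple of (developers_start_index, projects_start_index)
--     """
--     dev_start_idx = -1
--     proj_start_idx = -1
--
--     for i, row in enumerate(rows):
--         if len(row) > 0:
--             if row[0].lower() == 'developers':
--                 dev_start_idx = i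
--             elif row[0].lower() == 'projects':
--                 proj_start_idx = i
--
--     return dev_start_idx, proj_start_idx
-- ===== SOURCE B (Python) =====
-- from typing import List, Tuple
--
-- def _find_section_indices(rows: List[List[str]]) -> Tuple[int, int]:
--     """Staged decomposition: extract the lowered first-column keys once,
--     then locate each marker independently with the library search
--     list.index on the reversed key column (first hit from the end =
--     last occurrence in original order)."""
--     keys = [row[0].lower() if row else '' for row in rows]
--
--     def last_index(marker: str) -> int:
--         try:
--             return len(keys) - 1 - keys[::-1].index(marker)
--         except ValueError:
--             return -1
--
--     return last_index('developers'), last_index('projects')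
-- ===== Notes on version B (the rewrite author's own statement) =====
-- stated objective: alternative
-- what changed: B replaces A's fused forward loop with two accumulators by a staged pipeline: it first projects the rows to a lowered key column, then finds each marker's last occurrence independently via list.index on the reversed key list; there is no accumulator loop at all.
import Mathlib
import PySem

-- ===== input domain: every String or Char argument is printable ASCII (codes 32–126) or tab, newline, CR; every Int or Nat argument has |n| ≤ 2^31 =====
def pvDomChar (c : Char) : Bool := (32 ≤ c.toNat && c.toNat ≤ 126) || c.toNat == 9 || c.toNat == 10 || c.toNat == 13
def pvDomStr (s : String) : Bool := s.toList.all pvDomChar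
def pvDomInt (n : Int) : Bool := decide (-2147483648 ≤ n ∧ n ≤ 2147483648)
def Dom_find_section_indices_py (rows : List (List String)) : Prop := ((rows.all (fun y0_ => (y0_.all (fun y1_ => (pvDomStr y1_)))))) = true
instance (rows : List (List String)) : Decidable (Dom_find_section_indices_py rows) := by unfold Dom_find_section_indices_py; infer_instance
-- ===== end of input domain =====

-- B replaces A's fused forward loop with two accumulators by a staged pipeline: project the
-- rows to a lowered key column once, then locate each marker's last occurrence independently
-- with a library first-index search on the reversed key list (objective: alternative).

-- row[0] under the guard len(row) > 0 (exact there)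
def pvHead0 (row : List String) : String := row.headD ""

-- ===== PORT A =====
def find_section_indices_py (rows : List (List String)) : Int × Int :=
  (PySem.List.enumerate rows).foldl
    (fun s p =>
      if p.2 ≠ [] then
        if PySem.Str.lower (pvHead0 p.2) = "developers" then (p.1, s.2)
        else if PySem.Str.lower (pvHead0 p.2) = "projects" then (s.1, p.1)
        else s
      else s)
    (-1, -1)

-- ===== PORT B =====
-- the key column: row[0].lower() if row else ''
def pvKeys (rows : List (List String)) : List String :=
  rows.map (fun row => if row = [] then "" else PySem.Str.lower (pvHead0 row))

-- len(keys) - 1 - keys[::-1].index(marker), or -1 on ValueError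
def pvLastIndex (keys : List String) (m : String) : Int :=
  match PySem.List.index? keys.reverse m with
  | some i => (keys.length : Int) - 1 - (i : Int)
  | none => -1

def find_section_indices_py_alt (rows : List (List String)) : Int × Int :=
  (pvLastIndex (pvKeys rows) "developers", pvLastIndex (pvKeys rows) "projects")

-- ===== PRECONDITION & SPEC =====
def Spec_find_section_indices_py (rows : List (List String)) (out : Int × Int) : Prop := out = find_section_indices_py_alt rows
instance (rows : List (List String)) (out : Int × Int) : Decidable (Spec_find_section_indices_py rows out) := by unfold Spec_find_section_indices_py; infer_instance

-- ===== CLAIM (what is proved, stated in full; the proofs are below) =====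
def Claim_equal_find_section_indices_py : Prop := ∀ (rows : List (List String)), Dom_find_section_indices_py rows → Spec_find_section_indices_py rows (find_section_indices_py rows)

-- ===== LEMMAS AND PROOFS =====

def pvMatch (m : String) (row : List String) : Bool :=
  !row.isEmpty && (PySem.Str.lower (pvHead0 row) == m)

theorem pvMatch_iff (m : String) (row : List String) :
    pvMatch m row = true ↔ row ≠ [] ∧ PySem.Str.lower (pvHead0 row) = m := by
  simp [pvMatch]

-- index of the last matching pair, -1 if none
def pvLast (m : String) : List (Int × List String) → Int
  | [] => -1
  | (i, row) :: rest =>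
    if pvLast m rest = -1 then (if pvMatch m row then i else -1) else pvLast m rest

theorem pvMatch_excl {row : List String} (h1 : pvMatch "developers" row)
    (h2 : pvMatch "projects" row) : False := by
  have := ((pvMatch_iff _ _).mp h1).2.symm.trans ((pvMatch_iff _ _).mp h2).2
  simp at this

theorem enumerate_nonneg (rows : List (List String)) :
    ∀ q ∈ PySem.List.enumerate rows 0, 0 ≤ q.1 := by
  intro q hq
  rw [PySem.List.mem_enumerate_iff] at hq
  obtain ⟨k, hk, rfl⟩ := hq
  simp

-- A's fused fold computes the last match of each marker (with -1 defaults d, p)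
theorem lemA (l : List (Int × List String)) (hl : ∀ q ∈ l, 0 ≤ q.1) (d p : Int) :
    l.foldl
      (fun s q =>
        if q.2 ≠ [] then
          if PySem.Str.lower (pvHead0 q.2) = "developers" then (q.1, s.2)
          else if PySem.Str.lower (pvHead0 q.2) = "projects" then (s.1, q.1)
          else s
        else s)
      (d, p)
    = ((if pvLast "developers" l = -1 then d else pvLast "developers" l),
       (if pvLast "projects" l = -1 then p else pvLast "projects" l)) := by
  induction l generalizing d p with
  | nil => simp [pvLast]
  | cons x rest ih =>
    obtain ⟨i, row⟩ := x
    have hi : (0 : Int) ≤ i := hl (i, row) (List.mem_cons_self ..)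
    have hi' : i ≠ -1 := by omega
    have hrest : ∀ q ∈ rest, 0 ≤ q.1 := fun q hq => hl q (List.mem_cons_of_mem _ hq)
    by_cases hd : pvMatch "developers" row
    · obtain ⟨hd1, hd2⟩ := (pvMatch_iff _ _).mp hd
      have hp : ¬ pvMatch "projects" row = true := fun h => pvMatch_excl hd h
      simp only [List.foldl_cons]
      rw [show (if (i, row).2 ≠ [] then
            if PySem.Str.lower (pvHead0 (i, row).2) = "developers" then ((i, row).1, (d, p).2)
            else if PySem.Str.lower (pvHead0 (i, row).2) = "projects" then ((d, p).1, (i, row).1)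
            else (d, p) else (d, p)) = (i, p) from by
        simp [hd1, hd2]]
      rw [ih hrest]
      simp only [pvLast, if_pos hd, if_neg hp]
      by_cases h1 : pvLast "developers" rest = -1 <;>
        by_cases h2 : pvLast "projects" rest = -1 <;> simp [h1, h2, hi']
    · by_cases hp : pvMatch "projects" row
      · obtain ⟨hp1, hp2⟩ := (pvMatch_iff _ _).mp hp
        simp only [List.foldl_cons]
        rw [show (if (i, row).2 ≠ [] then
              if PySem.Str.lower (pvHead0 (i, row).2) = "developers" then ((i, row).1, (d, p).2)
              else if PySem.Str.lower (pvHead0 (i, row).2) = "projects" then ((d, p).1, (i, row).1)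
              else (d, p) else (d, p)) = (d, i) from by
          have : PySem.Str.lower (pvHead0 row) ≠ "developers" :=
            fun h => hd ((pvMatch_iff _ _).mpr ⟨hp1, h⟩)
          simp [hp1, hp2]]
        rw [ih hrest]
        simp only [pvLast, if_pos hp, if_neg hd]
        by_cases h1 : pvLast "developers" rest = -1 <;>
          by_cases h2 : pvLast "projects" rest = -1 <;> simp [h1, h2, hi']
      · simp only [List.foldl_cons]
        rw [show (if (i, row).2 ≠ [] then
              if PySem.Str.lower (pvHead0 (i, row).2) = "developers" then ((i, row).1, (d, p).2)
              else if PySem.Str.lower (pvHead0 (i, row).2) = "projects" then ((d, p).1, (i, row).1)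
              else (d, p) else (d, p)) = (d, p) from by
          by_cases hr : row = []
          · simp [hr]
          · have h1 : PySem.Str.lower (pvHead0 row) ≠ "developers" :=
              fun h => hd ((pvMatch_iff _ _).mpr ⟨hr, h⟩)
            have h2 : PySem.Str.lower (pvHead0 row) ≠ "projects" :=
              fun h => hp ((pvMatch_iff _ _).mpr ⟨hr, h⟩)
            simp [hr, h1, h2]]
        rw [ih hrest]
        simp only [pvLast, if_neg hd, if_neg hp]
        by_cases h1 : pvLast "developers" rest = -1 <;>
          by_cases h2 : pvLast "projects" rest = -1 <;> simp [h1, h2]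

-- pvLast over an appended singleton
theorem pvLast_append_singleton (m : String) (l : List (Int × List String)) (i : Int) (row : List String)
    (hl : ∀ q ∈ l, 0 ≤ q.1) (hi : 0 ≤ i) :
    pvLast m (l ++ [(i, row)]) = if pvMatch m row then i else pvLast m l := by
  induction l with
  | nil => simp [pvLast]
  | cons x rest ih =>
    obtain ⟨j, r⟩ := x
    have hj : (0 : Int) ≤ j := hl (j, r) (List.mem_cons_self ..)
    have hrest : ∀ q ∈ rest, 0 ≤ q.1 := fun q hq => hl q (List.mem_cons_of_mem _ hq)
    simp only [List.cons_append, pvLast, ih hrest]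
    by_cases hm : pvMatch m row
    · rw [if_pos hm, if_pos hm, if_neg (by omega)]
    · simp [hm]

-- the key of a row matches m (m nonempty) iff the row matches m
theorem key_match (m : String) (hm : m ≠ "") (row : List String) :
    ((if row = [] then "" else PySem.Str.lower (pvHead0 row)) = m) ↔ pvMatch m row = true := by
  rw [pvMatch_iff]
  by_cases hr : row = []
  · simp [hr, Ne.symm hm]
  · simp [hr]

-- B's staged search computes the same last-match index
theorem lemB (rows : List (List String)) (m : String) (hm : m ≠ "") :
    pvLastIndex (pvKeys rows) m = pvLast m (PySem.List.enumerate rows 0) := by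
  induction rows using List.reverseRecOn with
  | nil => simp [pvKeys, pvLastIndex, PySem.List.index?, pvLast, PySem.List.enumerate]
  | append_singleton rs r ih =>
    have hkeys : pvKeys (rs ++ [r]) = pvKeys rs ++ [if r = [] then "" else PySem.Str.lower (pvHead0 r)] := by
      simp [pvKeys]
    have henum : PySem.List.enumerate (rs ++ [r]) 0
        = PySem.List.enumerate rs 0 ++ [((rs.length : Int), r)] := by
      rw [PySem.List.enumerate_append]
      simp [PySem.List.enumerate_cons, PySem.List.enumerate_nil]
    rw [henum, pvLast_append_singleton m _ _ _ (enumerate_nonneg rs) (by positivity)]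
    by_cases hmatch : pvMatch m r
    · have hk : (if r = [] then "" else PySem.Str.lower (pvHead0 r)) = m := (key_match m hm r).mpr hmatch
      rw [if_pos hmatch]
      unfold pvLastIndex
      rw [hkeys, List.reverse_append, hk]
      simp only [List.reverse_singleton, List.singleton_append]
      rw [PySem.List.index?_cons_self]
      simp [pvKeys]
    · have hk : (if r = [] then "" else PySem.Str.lower (pvHead0 r)) ≠ m :=
        fun h => hmatch ((key_match m hm r).mp h)
      rw [if_neg hmatch, ← ih]
      unfold pvLastIndex
      rw [hkeys, List.reverse_append]
      simp only [List.reverse_singleton, List.singleton_append]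
      rw [PySem.List.index?_cons_of_ne _ hk]
      cases hfind : PySem.List.index? (pvKeys rs).reverse m with
      | none => simp
      | some i =>
        simp only [Option.map_some]
        have : (pvKeys (rs ++ [r])).length = (pvKeys rs).length + 1 := by simp [pvKeys]
        simp [pvKeys]
        ring

-- ===== VERDICT (by name: the statement is the Claim_ definition above) =====
theorem find_section_indices_py_spec : Claim_equal_find_section_indices_py := by
  intro rows _
  unfold Spec_find_section_indices_py find_section_indices_py find_section_indices_py_alt
  rw [lemA _ (enumerate_nonneg rows),
      lemB rows "developers" (by decide), lemB rows "projects" (by decide)]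
  by_cases h1 : pvLast "developers" (PySem.List.enumerate rows 0) = -1 <;>
    by_cases h2 : pvLast "projects" (PySem.List.enumerate rows 0) = -1 <;>
      simp [h1, h2]
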